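-- pv_equiv track=rewrite | github.com/Recusive/Nightshift | Recursive/engine/pick-role.py | count_consecutive_role
-- ===== SOURCE A (Python) =====
-- def count_consecutive_role(rows: list[dict[str, str]], role: str) -> int:
--     """Count consecutive sessions of a given role from the end of the index."""
--     count = 0
--     for row in reversed(rows):
--         if row.get("role", "build").lower() == role:
--             count += 1
--         else:
--             break
--     return count
-- ===== SOURCE B (Python) =====
-- def count_consecutive_role(rows: list[dict[str, str]], role: str) -> int:
--     """Count consecutive sessions of a given role from the end of the index."""
--     run = 0
--     for row in rows:
--         if row.get("role", "build").lower() == role: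
--             run += 1
--         else:
--             run = 0
--     return run
-- ===== Notes on version B (the rewrite author's own statement) =====
-- stated objective: alternative
-- what changed: Replaces the backward early-break scan with a single forward pass maintaining a resettable run counter; the final counter equals the trailing matching run length.
import Mathlib
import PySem

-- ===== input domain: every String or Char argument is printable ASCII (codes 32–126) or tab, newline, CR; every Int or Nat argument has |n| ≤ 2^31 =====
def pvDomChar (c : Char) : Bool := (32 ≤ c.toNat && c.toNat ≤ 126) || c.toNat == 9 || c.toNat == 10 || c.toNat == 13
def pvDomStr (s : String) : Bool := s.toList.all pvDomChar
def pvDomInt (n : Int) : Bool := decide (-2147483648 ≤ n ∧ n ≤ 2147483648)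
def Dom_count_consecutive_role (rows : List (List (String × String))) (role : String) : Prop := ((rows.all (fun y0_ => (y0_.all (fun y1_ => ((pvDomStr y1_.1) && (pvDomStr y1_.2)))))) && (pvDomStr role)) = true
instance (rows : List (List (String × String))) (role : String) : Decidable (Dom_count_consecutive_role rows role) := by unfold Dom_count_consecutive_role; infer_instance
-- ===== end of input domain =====

-- B replaces A's backward early-break scan by a forward pass with a resettable run counter; alternative decomposition, same results.

-- ===== PORT A =====
-- A's loop over reversed(rows) with break: structural recursion on rows.reverse that stops at the first mismatch.
def pvMatchRow (row : List (String × String)) (role : String) : Bool :=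
  PySem.Str.lower (PySem.Dict.getD ⟨row⟩ "role" "build") == role

def pvCountFromEnd (role : String) : List (List (String × String)) → Int
  | [] => 0
  | row :: rest => if pvMatchRow row role then 1 + pvCountFromEnd role rest else 0

def count_consecutive_role (rows : List (List (String × String))) (role : String) : Int :=
  pvCountFromEnd role rows.reverse

-- ===== PORT B =====
-- B's forward loop: fold over rows with a run counter that resets on mismatch.
def count_consecutive_role_alt (rows : List (List (String × String))) (role : String) : Int :=
  rows.foldl (fun run row => if pvMatchRow row role then run + 1 else 0) 0

-- ===== PRECONDITION & SPEC =====
def Spec_count_consecutive_role (rows : List (List (String × String))) (role : String) (out : Int) : Prop := out = count_consecutive_role_alt rows role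
instance (rows : List (List (String × String))) (role : String) (out : Int) : Decidable (Spec_count_consecutive_role rows role out) := by unfold Spec_count_consecutive_role; infer_instance

-- ===== CLAIM (what is proved, stated in full; the proofs are below) =====
def Claim_equal_count_consecutive_role : Prop := ∀ (rows : List (List (String × String))) (role : String), Dom_count_consecutive_role rows role → Spec_count_consecutive_role rows role (count_consecutive_role rows role)

-- ===== LEMMAS AND PROOFS =====
theorem pv_eq (rows : List (List (String × String))) (role : String) :
    pvCountFromEnd role rows.reverse =
      rows.foldl (fun run row => if pvMatchRow row role then run + 1 else 0) 0 := by
  induction rows using List.reverseRecOn with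
  | nil => rfl
  | append_singleton l x ih =>
      simp only [List.reverse_append, List.reverse_singleton, List.singleton_append,
        List.foldl_append, List.foldl_cons, List.foldl_nil, pvCountFromEnd]
      by_cases h : pvMatchRow x role
      · simp [h, ih]; omega
      · simp [h]

-- ===== VERDICT (by name: the statement is the Claim_ definition above) =====
theorem count_consecutive_role_spec : Claim_equal_count_consecutive_role := by
  intro rows role _
  unfold Spec_count_consecutive_role count_consecutive_role count_consecutive_role_alt
  exact pv_eq rows role
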